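-- pv_equiv track=rewrite | github.com/keras-team/keras | Lib/site-packages/toolz/itertoolz.py | partition_all
-- ===== SOURCE A (Python) =====
-- from itertools import filterfalse, zip_longest
--
-- no_pad = '__no__pad__'
--
-- def partition_all(n, seq):
--     """ Partition all elements of sequence into tuples of length at most n
--
--     The final tuple may be shorter to accommodate extra elements.
--
--     >>> list(partition_all(2, [1, 2, 3, 4]))
--     [(1, 2), (3, 4)]
--
--     >>> list(partition_all(2, [1, 2, 3, 4, 5]))
--     [(1, 2), (3, 4), (5,)]
--
--     See Also:
--         partition
--     """
--     args = [iter(seq)] * n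
--     it = zip_longest(*args, fillvalue=no_pad)
--     try:
--         prev = next(it)
--     except StopIteration:
--         return
--     for item in it:
--         yield prev
--         prev = item
--     if prev[-1] is no_pad:
--         try:
--             # If seq defines __len__, then
--             # we can quickly calculate where no_pad starts
--             yield prev[:len(seq) % n]
--         except TypeError:
--             # Get first index of no_pad without using .index()
--             # https://github.com/pytoolz/toolz/issues/387
--             # Binary search from CPython's bisect module,
--             # modified for identity testing.
--             lo, hi = 0, n
--             while lo < hi:
--                 mid = (lo + hi) // 2
--                 if prev[mid] is no_pad:
--                     hi = mid
--                 else: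
--                     lo = mid + 1
--             yield prev[:lo]
--     else:
--         yield prev
-- ===== SOURCE B (Python) =====
-- from itertools import islice
--
--
-- def partition_all(n, seq):
--     """Partition all elements of sequence into tuples of length at most n."""
--     if n < 1:
--         return
--     it = iter(seq)
--     while True:
--         chunk = tuple(islice(it, n))
--         if not chunk:
--             return
--         yield chunk
-- ===== Notes on version B (the rewrite author's own statement) =====
-- stated objective: simpler
-- what changed: Replaced the zip_longest sentinel transpose plus len%n / binary-search trimming of the last tuple by a plain streaming loop that slices n elements off the iterator per chunk and stops on an empty slice (with the n<1 guard matching zip_longest over zero iterators).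
import Mathlib
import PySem

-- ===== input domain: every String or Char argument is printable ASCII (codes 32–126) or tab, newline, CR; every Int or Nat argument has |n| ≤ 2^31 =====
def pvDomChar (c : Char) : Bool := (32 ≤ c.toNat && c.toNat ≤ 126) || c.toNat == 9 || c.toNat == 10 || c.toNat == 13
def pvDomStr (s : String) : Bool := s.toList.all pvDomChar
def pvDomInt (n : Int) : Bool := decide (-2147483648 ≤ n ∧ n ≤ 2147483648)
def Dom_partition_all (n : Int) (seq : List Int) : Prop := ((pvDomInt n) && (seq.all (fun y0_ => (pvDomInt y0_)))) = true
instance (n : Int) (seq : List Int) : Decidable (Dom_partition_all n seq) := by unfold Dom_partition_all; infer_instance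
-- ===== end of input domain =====

-- B replaces A's zip_longest/no_pad sentinel transpose (and its len%n / binary-search trim
-- of the last tuple) by a plain streaming take/drop chunk loop; objective: simpler.

-- ===== PORT A =====
-- The zip_longest over n copies of one iterator of seq: groups of exactly n, the last
-- group padded with the `no_pad` sentinel (modelled as `none`; real elements are `some`).
def pvPadChunks (n : Nat) : List (Option Int) → List (List (Option Int))
  | [] => []
  | x :: xs =>
      (((x :: xs).take n) ++ List.replicate (n - (x :: xs).length) none)
        :: pvPadChunks n (xs.drop (n - 1))
  termination_by xs => xs.length
  decreasing_by simp

-- `for item in it: yield prev; prev = item` + the final handling of `prev`: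
-- every tuple but the last is yielded whole; the last is trimmed to len(seq) % n
-- when its final slot is the sentinel (seq is a list, so len(seq) succeeds).
def pvProcRows (m : Nat) : List (List (Option Int)) → List (List Int)
  | [] => []
  | [prev] =>
      [ if prev.getLast? = some none then (prev.take m).filterMap id
        else prev.filterMap id ]
  | prev :: r :: rest => prev.filterMap id :: pvProcRows m (r :: rest)

def partition_all (n : Int) (seq : List Int) : List (List Int) :=
  if n ≤ 0 then []  -- [iter(seq)] * n is empty: zip_longest() yields nothing
  else pvProcRows (seq.length % n.toNat) (pvPadChunks n.toNat (seq.map some))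

-- ===== PORT B =====
-- chunk = x plus the next (n-1) elements; recurse on the rest; stop on empty.
def pvChunks (m : Nat) : List Int → List (List Int)
  | [] => []
  | x :: xs => (x :: xs.take m) :: pvChunks m (xs.drop m)
  termination_by xs => xs.length
  decreasing_by simp

def partition_all_alt (n : Int) (seq : List Int) : List (List Int) :=
  if n < 1 then [] else pvChunks (n.toNat - 1) seq

-- ===== PRECONDITION & SPEC =====
def Spec_partition_all (n : Int) (seq : List Int) (out : List (List Int)) : Prop := out = partition_all_alt n seq
instance (n : Int) (seq : List Int) (out : List (List Int)) : Decidable (Spec_partition_all n seq out) := by unfold Spec_partition_all; infer_instance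

-- ===== CLAIM (what is proved, stated in full; the proofs are below) =====
def Claim_equal_partition_all : Prop := ∀ (n : Int) (seq : List Int), Dom_partition_all n seq → Spec_partition_all n seq (partition_all n seq)

-- ===== LEMMAS AND PROOFS =====

lemma pvKey (N : Nat) (hN : 1 ≤ N) :
    ∀ (k : Nat) (seq : List Int), seq.length ≤ k →
      pvProcRows (seq.length % N) (pvPadChunks N (seq.map some)) = pvChunks (N - 1) seq := by
  intro k
  induction k with
  | zero =>
      intro seq h
      have : seq = [] := List.eq_nil_of_length_eq_zero (Nat.le_zero.mp h)
      subst this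
      simp [pvPadChunks, pvChunks, pvProcRows]
  | succ k ih =>
      intro seq h
      match seq with
      | [] => simp [pvPadChunks, pvChunks, pvProcRows]
      | x :: xs =>
        have hlen : (x :: xs).length = xs.length + 1 := rfl
        by_cases hle : xs.length + 1 ≤ N
        · -- single (possibly padded) row
          have hdrop : xs.drop (N - 1) = [] := by
            apply List.drop_eq_nil_of_le; omega
          have hrow :
              pvPadChunks N ((x :: xs).map some) =
                [((x :: xs).map some) ++ List.replicate (N - (xs.length + 1)) none] := by
            rw [List.map_cons, pvPadChunks]
            have : (xs.map some).drop (N - 1) = [] := by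
              apply List.drop_eq_nil_of_le; simp; omega
            rw [this]
            simp [pvPadChunks]
            rw [List.take_of_length_le (by simp; omega)]
            simp
          rw [hrow]
          by_cases heq : xs.length + 1 = N
          · -- exactly full: no padding, else branch
            have hpad : N - (xs.length + 1) = 0 := by omega
            rw [hpad]
            simp only [List.replicate_zero, List.append_nil, pvProcRows]
            have hlast : ((x :: xs).map some).getLast? ≠ some (none : Option Int) := by
              rw [List.getLast?_map]
              cases h' : (x :: xs).getLast? with
              | none => simp
              | some v => simp
            rw [if_neg hlast]
            have hchunk : pvChunks (N - 1) (x :: xs) = [x :: xs] := by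
              rw [pvChunks]
              have h1 : xs.take (N - 1) = xs := List.take_of_length_le (by omega)
              have h2 : xs.drop (N - 1) = [] := by apply List.drop_eq_nil_of_le; omega
              rw [h1, h2]; simp [pvChunks]
            rw [hchunk]
            simp [List.filterMap_map, Function.comp]
          · -- short last row: padded, trimmed by length % N
            have hlt : xs.length + 1 < N := by omega
            have hmod : (x :: xs).length % N = xs.length + 1 := by
              rw [hlen]; exact Nat.mod_eq_of_lt hlt
            simp only [hmod, pvProcRows]
            have hpadpos : 1 ≤ N - (xs.length + 1) := by omega
            have hlast :
                (((x :: xs).map some) ++ List.replicate (N - (xs.length + 1)) none).getLast?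
                  = some (none : Option Int) := by
              rw [List.getLast?_append_of_ne_nil]
              · cases hc : N - (xs.length + 1) with
                | zero => omega
                | succ j =>
                    rw [List.getLast?_eq_some_iff]
                    exact ⟨List.replicate j none, by simp [List.replicate_succ']⟩
              · intro hc
                have := congrArg List.length hc
                simp at this; omega
            rw [if_pos hlast]
            have htake :
                ((((x :: xs).map some) ++ List.replicate (N - (xs.length + 1)) none).take (xs.length + 1))
                  = (x :: xs).map some := by
              rw [List.take_append_of_le_length (by simp)]
              exact List.take_of_length_le (by simp)
            rw [htake]
            have hchunk : pvChunks (N - 1) (x :: xs) = [x :: xs] := by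
              rw [pvChunks]
              have h1 : xs.take (N - 1) = xs := List.take_of_length_le (by omega)
              have h2 : xs.drop (N - 1) = [] := by apply List.drop_eq_nil_of_le; omega
              rw [h1, h2]; simp [pvChunks]
            rw [hchunk]
            simp [List.filterMap_map, Function.comp]
        · -- more than one row
          have hgt : N < xs.length + 1 := by omega
          have hrow :
              pvPadChunks N ((x :: xs).map some) =
                (((x :: xs).take N).map some) :: pvPadChunks N ((xs.drop (N - 1)).map some) := by
            rw [List.map_cons, pvPadChunks]
            have hpad : N - ((some x :: xs.map some).length) = 0 := by simp; omega
            rw [hpad]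
            simp only [List.replicate_zero, List.append_nil]
            congr 1
            · rw [← List.map_cons, ← List.map_take]
            · rw [List.map_drop]
          rw [hrow]
          have hrest_ne : (xs.drop (N - 1)).map some ≠ [] := by
            simp [List.drop_eq_nil_iff]; omega
          have hproc :
              ∀ (rows : List (List (Option Int))), rows ≠ [] → ∀ (m : Nat) (p : List (Option Int)),
                pvProcRows m (p :: rows) = p.filterMap id :: pvProcRows m rows := by
            intro rows hne m p
            cases rows with
            | nil => exact absurd rfl hne
            | cons r rest => rfl
          rw [pvPadChunks.eq_def]
          cases hdm : (xs.drop (N - 1)).map some with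
          | nil => exact absurd hdm hrest_ne
          | cons y ys =>
            rw [← hdm, ← pvPadChunks.eq_def]
            have hpc_ne : pvPadChunks N ((xs.drop (N - 1)).map some) ≠ [] := by
              rw [hdm, pvPadChunks]; simp
            rw [hproc _ hpc_ne]
            have hmod2 : (x :: xs).length % N = (xs.drop (N - 1)).length % N := by
              rw [hlen, List.length_drop]
              have : xs.length + 1 - N + N = xs.length + 1 := by omega
              have h2 : xs.length - (N - 1) = xs.length + 1 - N := by omega
              rw [h2, ← Nat.add_mod_right (xs.length + 1 - N) N, this]
            rw [hmod2, ih (xs.drop (N - 1)) (by simp; omega)]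
            rw [pvChunks]
            have hN' : N - 1 + 1 = N := by omega
            have hhead : (((x :: xs).take N).map some).filterMap id = x :: xs.take (N - 1) := by
              have ht : (x :: xs).take N = x :: xs.take (N - 1) := by
                conv_lhs => rw [← hN']
                rw [List.take_succ_cons]
              rw [ht]; simp
            rw [hhead]

-- ===== VERDICT (by name: the statement is the Claim_ definition above) =====
theorem partition_all_spec : Claim_equal_partition_all := by
  intro n seq _
  unfold Spec_partition_all partition_all partition_all_alt
  by_cases hn : n ≤ 0
  · rw [if_pos hn, if_pos (by omega)]
  · rw [if_neg hn, if_neg (by omega)]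
    exact pvKey n.toNat (by omega) seq.length seq le_rfl
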